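-- pv_equiv track=rewrite | github.com/workfloworchestrator/nwa-stdlib | nwastdlib/vlans.py | expand_ranges
-- ===== SOURCE A (Python) =====
-- from collections.abc import Iterable, Iterator, Sequence
--
-- def expand_ranges(ranges: Sequence[Sequence[int]], inclusive: bool = False) -> list[int]:
--     """Expand sequence of range definitions into sorted and deduplicated list of individual values.
--
--     A range definition is either a:
--
--     * one element sequence -> an individual value.
--     * two element sequence -> a range of values (either inclusive or exclusive).
--
--     >>> expand_ranges([[1], [2], [10, 12]])
--     [1, 2, 10, 11]
--     >>> expand_ranges([[1], [2], [10, 12]], inclusive=True)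
--     [1, 2, 10, 11, 12]
--     >>> expand_ranges([[]])
--     Traceback (most recent call last):
--         ...
--     ValueError: Expected 1 or 2 element list for range definition. Got f0 element list instead.
--
--     Resulting list is sorted::
--
--         >>> expand_ranges([[100], [1, 4]], inclusive=True)
--         [1, 2, 3, 4, 100]
--
--     Args:
--         ranges: sequence of range definitions
--         inclusive: are the stop values of the range definition inclusive or exclusive.
--
--     Returns:
--         Sorted deduplicated list of individual values.
--
--     Raises:
--         ValueError: if range definition is not a one or two element sequence.
--
--     """
--     values: set[int] = set()
--     for r in ranges:
--         if len(r) == 2: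
--             values.update(range(r[0], r[1] + (1 if inclusive else 0)))
--         elif len(r) == 1:
--             values.add(r[0])
--         else:
--             raise ValueError(f"Expected 1 or 2 element list for range definition. Got f{len(r)} element list instead.")
--     return sorted(values)
-- ===== SOURCE B (Python) =====
-- def expand_ranges(ranges, inclusive=False):
--     """Expand range definitions by merging sorted runs (no set, no final sort)."""
--
--     def merge(xs, ys):
--         # merge two strictly increasing lists, dropping duplicates
--         out = []
--         i = j = 0
--         while i < len(xs) and j < len(ys):
--             if xs[i] < ys[j]:
--                 out.append(xs[i]); i += 1
--             elif ys[j] < xs[i]: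
--                 out.append(ys[j]); j += 1
--             else:
--                 out.append(xs[i]); i += 1; j += 1
--         out.extend(xs[i:])
--         out.extend(ys[j:])
--         return out
--
--     acc = []
--     for r in ranges:
--         if len(r) == 2:
--             run = list(range(r[0], r[1] + (1 if inclusive else 0)))
--         elif len(r) == 1:
--             run = [r[0]]
--         else:
--             raise ValueError(f"Expected 1 or 2 element list for range definition. Got f{len(r)} element list instead.")
--         acc = merge(acc, run)
--     return acc
-- ===== Notes on version B (the rewrite author's own statement) =====
-- stated objective: alternative
-- what changed: B keeps a sorted deduplicated accumulator and merges each range definition's strictly increasing run into it (two-pointer merge dropping duplicates), instead of accumulating a hash set and sorting it at the end.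
import Mathlib
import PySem

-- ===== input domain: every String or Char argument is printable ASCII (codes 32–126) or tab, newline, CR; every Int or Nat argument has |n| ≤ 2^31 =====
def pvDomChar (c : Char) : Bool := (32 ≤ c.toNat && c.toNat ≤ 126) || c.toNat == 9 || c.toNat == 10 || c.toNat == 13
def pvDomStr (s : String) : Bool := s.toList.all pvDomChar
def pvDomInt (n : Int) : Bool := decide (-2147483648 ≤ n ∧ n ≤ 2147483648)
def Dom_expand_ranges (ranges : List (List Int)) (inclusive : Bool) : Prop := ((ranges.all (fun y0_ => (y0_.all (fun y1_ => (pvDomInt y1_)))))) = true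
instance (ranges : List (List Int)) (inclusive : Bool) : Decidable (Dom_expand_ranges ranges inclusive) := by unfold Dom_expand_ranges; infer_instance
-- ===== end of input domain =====

-- B merges each range definition's strictly increasing run into a sorted deduplicated
-- accumulator (two-pointer merge) instead of accumulating a set and sorting at the end.


-- ===== PORT A =====
-- one loop iteration of A: update the set from the range definition (the 'else' branch raises
-- ValueError in Python; it is excluded by Pre_ and leaves the set unchanged here)
def expandStepA (inclusive : Bool) (s : PySem.Set Int) (r : List Int) : PySem.Set Int :=
  match r with
  | [a, b] => PySem.Set.update s (PySem.List.pyRange a (b + (if inclusive then 1 else 0)) 1)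
  | [a]    => PySem.Set.add s a
  | _      => s

def expand_ranges (ranges : List (List Int)) (inclusive : Bool) : List Int :=
  let values : PySem.Set Int := ranges.foldl (expandStepA inclusive) PySem.Set.empty
  PySem.List.sorted values (fun x => x) false

-- ===== PORT B =====
-- merge of two strictly increasing lists, dropping duplicates (B's two-pointer loop)
def mergeDedup : List Int → List Int → List Int
  | [], ys => ys
  | x :: xs, [] => x :: xs
  | x :: xs, y :: ys =>
      if x < y then x :: mergeDedup xs (y :: ys)
      else if y < x then y :: mergeDedup (x :: xs) ys
      else x :: mergeDedup xs ys
  termination_by xs ys => xs.length + ys.length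

-- the strictly increasing run of one range definition (the 'else' branch raises in Python)
def runB (inclusive : Bool) (r : List Int) : List Int :=
  match r with
  | [a, b] => PySem.List.pyRange a (b + (if inclusive then 1 else 0)) 1
  | [a]    => [a]
  | _      => []

def expand_ranges_alt (ranges : List (List Int)) (inclusive : Bool) : List Int :=
  ranges.foldl (fun acc r => mergeDedup acc (runB inclusive r)) []

-- ===== PRECONDITION & SPEC =====
-- Pre_ excludes exactly the inputs containing a range definition of length other than 1 or 2,
-- on which the Python A (and B) raises ValueError.
def Pre_expand_ranges (ranges : List (List Int)) (inclusive : Bool) : Prop :=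
  ∀ r ∈ ranges, r.length = 1 ∨ r.length = 2
instance (ranges : List (List Int)) (inclusive : Bool) : Decidable (Pre_expand_ranges ranges inclusive) := by unfold Pre_expand_ranges; infer_instance

def pvWitness_expand_ranges : List (List Int) × Bool := ([[1], [2], [10, 12]], false)

def Spec_expand_ranges (ranges : List (List Int)) (inclusive : Bool) (out : List Int) : Prop := out = expand_ranges_alt ranges inclusive
instance (ranges : List (List Int)) (inclusive : Bool) (out : List Int) : Decidable (Spec_expand_ranges ranges inclusive out) := by unfold Spec_expand_ranges; infer_instance

-- ===== CLAIM (what is proved, stated in full; the proofs are below) =====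
def Claim_equal_expand_ranges : Prop := ∀ (ranges : List (List Int)) (inclusive : Bool), Dom_expand_ranges ranges inclusive → Pre_expand_ranges ranges inclusive → Spec_expand_ranges ranges inclusive (expand_ranges ranges inclusive)

-- ===== LEMMAS AND PROOFS =====

-- A's fold keeps the set duplicate-free
lemma foldA_nodup (inclusive : Bool) (ranges : List (List Int)) (s : PySem.Set Int)
    (hs : s.Nodup) : (ranges.foldl (expandStepA inclusive) s).Nodup := by
  induction ranges generalizing s with
  | nil => simpa using hs
  | cons r rs ih =>
      refine ih _ ?_
      unfold expandStepA
      match r with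
      | [] => exact hs
      | [a] => exact PySem.Set.nodup_add s a hs
      | [a, b] => exact PySem.Set.nodup_update s _ hs
      | a :: b :: c :: t => exact hs

-- membership in A's fold
lemma mem_foldA (inclusive : Bool) (ranges : List (List Int)) (s : PySem.Set Int) (x : Int) :
    x ∈ ranges.foldl (expandStepA inclusive) s ↔ x ∈ s ∨ ∃ r ∈ ranges, x ∈ runB inclusive r := by
  induction ranges generalizing s with
  | nil => simp
  | cons r rs ih =>
      simp only [List.foldl_cons, ih, List.mem_cons]
      constructor
      · rintro (h | h)
        · unfold expandStepA at h
          match r with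
          | [] => exact Or.inl h
          | [a] =>
              rcases (PySem.Set.mem_add _ _ _).1 h with h' | h'
              · exact Or.inl h'
              · exact Or.inr ⟨[a], Or.inl rfl, by simp [runB, h']⟩
          | [a, b] =>
              rcases (PySem.Set.mem_update _ _ _).1 h with h' | h'
              · exact Or.inl h'
              · exact Or.inr ⟨[a, b], Or.inl rfl, by simpa [runB] using h'⟩
          | a :: b :: c :: t => exact Or.inl h
        · exact Or.inr ⟨h.choose, Or.inr h.choose_spec.1, h.choose_spec.2⟩
      · rintro (h | ⟨r', hr', hx⟩)
        · refine Or.inl ?_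
          unfold expandStepA
          match r with
          | [] => exact h
          | [a] => exact (PySem.Set.mem_add _ _ _).2 (Or.inl h)
          | [a, b] => exact (PySem.Set.mem_update _ _ _).2 (Or.inl h)
          | a :: b :: c :: t => exact h
        · rcases hr' with rfl | hr'
          · refine Or.inl ?_
            unfold expandStepA
            match r' with
            | [] => simp [runB] at hx
            | [a] => exact (PySem.Set.mem_add _ _ _).2 (Or.inr (by simpa [runB] using hx))
            | [a, b] => exact (PySem.Set.mem_update _ _ _).2 (Or.inr (by simpa [runB] using hx))
            | a :: b :: c :: t => simp [runB] at hx
          · exact Or.inr ⟨r', hr', hx⟩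

-- membership in B's merge
lemma mem_mergeDedup (xs ys : List Int) (x : Int) :
    x ∈ mergeDedup xs ys ↔ x ∈ xs ∨ x ∈ ys := by
  fun_induction mergeDedup xs ys with
  | case1 ys => simp
  | case2 x' xs => simp
  | case3 a as b bs h ih => simp only [List.mem_cons, ih]; tauto
  | case4 a as b bs h h' ih => simp only [List.mem_cons, ih]; tauto
  | case5 a as b bs h h' ih =>
      simp only [List.mem_cons, ih]
      have : a = b := le_antisymm (not_lt.1 h') (not_lt.1 h)
      subst this; tauto

-- B's merge keeps strict sortedness
lemma pairwise_mergeDedup (xs ys : List Int)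
    (hx : xs.Pairwise (· < ·)) (hy : ys.Pairwise (· < ·)) :
    (mergeDedup xs ys).Pairwise (· < ·) := by
  fun_induction mergeDedup xs ys with
  | case1 ys => simpa using hy
  | case2 x' xs => simpa using hx
  | case3 a as b bs h ih =>
      refine List.pairwise_cons.2 ⟨?_, ih hx.of_cons hy⟩
      intro w hw
      rcases (mem_mergeDedup _ _ _).1 hw with hw | hw
      · exact List.rel_of_pairwise_cons hx hw
      · rcases List.mem_cons.1 hw with rfl | hw
        · exact h
        · exact lt_trans h (List.rel_of_pairwise_cons hy hw)
  | case4 a as b bs h h' ih =>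
      refine List.pairwise_cons.2 ⟨?_, ih hx hy.of_cons⟩
      intro w hw
      rcases (mem_mergeDedup _ _ _).1 hw with hw | hw
      · rcases List.mem_cons.1 hw with rfl | hw
        · exact h'
        · exact lt_trans h' (List.rel_of_pairwise_cons hx hw)
      · exact List.rel_of_pairwise_cons hy hw
  | case5 a as b bs h h' ih =>
      have hab : a = b := le_antisymm (not_lt.1 h') (not_lt.1 h)
      subst hab
      refine List.pairwise_cons.2 ⟨?_, ih hx.of_cons hy.of_cons⟩
      intro w hw
      rcases (mem_mergeDedup _ _ _).1 hw with hw | hw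
      · exact List.rel_of_pairwise_cons hx hw
      · exact List.rel_of_pairwise_cons hy hw

-- each run is strictly increasing
lemma pairwise_runB (inclusive : Bool) (r : List Int) : (runB inclusive r).Pairwise (· < ·) := by
  unfold runB
  match r with
  | [] => simp
  | [a] => simp
  | [a, b] => exact PySem.List.pairwise_lt_pyRange_one _ _
  | a :: b :: c :: t => simp

-- B's fold: strictly increasing accumulator, membership = union of runs
lemma foldB_pairwise (inclusive : Bool) (ranges : List (List Int)) (acc : List Int)
    (ha : acc.Pairwise (· < ·)) :
    (ranges.foldl (fun acc r => mergeDedup acc (runB inclusive r)) acc).Pairwise (· < ·) := by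
  induction ranges generalizing acc with
  | nil => simpa using ha
  | cons r rs ih => exact ih _ (pairwise_mergeDedup _ _ ha (pairwise_runB inclusive r))

lemma mem_foldB (inclusive : Bool) (ranges : List (List Int)) (acc : List Int) (x : Int) :
    x ∈ ranges.foldl (fun acc r => mergeDedup acc (runB inclusive r)) acc ↔
      x ∈ acc ∨ ∃ r ∈ ranges, x ∈ runB inclusive r := by
  induction ranges generalizing acc with
  | nil => simp
  | cons r rs ih =>
      simp only [List.foldl_cons, ih, mem_mergeDedup, List.mem_cons]
      constructor
      · rintro ((h | h) | ⟨r', hr', hx⟩)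
        · exact Or.inl h
        · exact Or.inr ⟨r, Or.inl rfl, h⟩
        · exact Or.inr ⟨r', Or.inr hr', hx⟩
      · rintro (h | ⟨r', rfl | hr', hx⟩)
        · exact Or.inl (Or.inl h)
        · exact Or.inl (Or.inr hx)
        · exact Or.inr ⟨r', hr', hx⟩

-- ===== VERDICT (by name: the statement is the Claim_ definition above) =====
theorem expand_ranges_spec : Claim_equal_expand_ranges := by
  intro ranges inclusive _ _
  unfold Spec_expand_ranges expand_ranges
  have hSnodup : (ranges.foldl (expandStepA inclusive) PySem.Set.empty).Nodup :=
    foldA_nodup inclusive ranges _ List.nodup_nil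
  have hBpair : (expand_ranges_alt ranges inclusive).Pairwise (· < ·) :=
    foldB_pairwise inclusive ranges [] (by simp)
  have hBnodup : (expand_ranges_alt ranges inclusive).Nodup :=
    hBpair.imp ne_of_lt
  have hmem : ∀ x, x ∈ expand_ranges_alt ranges inclusive ↔
      x ∈ ranges.foldl (expandStepA inclusive) PySem.Set.empty := by
    intro x
    rw [mem_foldA]
    unfold expand_ranges_alt
    rw [mem_foldB]
    simp [PySem.Set.empty]
  have hperm : (expand_ranges_alt ranges inclusive).Perm
      (ranges.foldl (expandStepA inclusive) PySem.Set.empty) :=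
    (List.perm_ext_iff_of_nodup hBnodup hSnodup).2 hmem
  exact PySem.List.sorted_eq_of_perm_of_pairwise_lt _ _ (fun x => x) hperm hBpair
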